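-- pv_equiv track=rewrite | github.com/tomesz87/Hangman | task/tests.py | _fix_reply
-- ===== SOURCE A (Python) =====
-- def _fix_reply(reply: str):
--     pos = 0
--     phrases = []
--     while True:
--         pos1 = reply.find("letter:", pos)
--         if pos1 == -1:
--             phrases.append(reply[pos:].strip(' '))
--             break
--         pos1 += len("letter:")
--         phrases.append(reply[pos:pos1].strip(' '))
--         pos = pos1
--     return '\n'.join(phrases)
-- ===== SOURCE B (Python) =====
-- def _fix_reply(reply: str):
--     # Single left-to-right scan: cut a phrase whenever the buffer ends with "letter:".
--     phrases = []
--     buf = []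
--     for ch in reply:
--         buf.append(ch)
--         if ch == ':' and len(buf) >= 7 and buf[-7:] == ['l', 'e', 't', 't', 'e', 'r', ':']:
--             phrases.append(''.join(buf).strip(' '))
--             buf = []
--     phrases.append(''.join(buf).strip(' '))
--     return '\n'.join(phrases)
-- ===== Notes on version B (the rewrite author's own statement) =====
-- stated objective: alternative
-- what changed: Replaces the repeated reply.find('letter:', pos) slicing loop with a single character-by-character scan that accumulates a buffer and flushes a stripped phrase whenever the buffer ends with 'letter:'.
import Mathlib
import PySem

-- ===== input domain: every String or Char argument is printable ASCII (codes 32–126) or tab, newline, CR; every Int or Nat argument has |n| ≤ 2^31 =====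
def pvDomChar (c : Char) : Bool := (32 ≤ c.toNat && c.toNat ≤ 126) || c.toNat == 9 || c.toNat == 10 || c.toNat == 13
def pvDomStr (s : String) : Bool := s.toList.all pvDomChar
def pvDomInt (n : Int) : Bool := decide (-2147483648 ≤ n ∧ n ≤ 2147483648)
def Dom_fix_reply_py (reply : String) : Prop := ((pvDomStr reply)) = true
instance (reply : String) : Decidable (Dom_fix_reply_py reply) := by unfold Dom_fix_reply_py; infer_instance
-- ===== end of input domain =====

-- B replaces A's repeated-find loop with a single left-to-right character scan that
-- cuts a phrase whenever the buffer ends with "letter:" (objective: alternative).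

def pvSep : List Char := ['l','e','t','t','e','r',':']

-- ===== PORT A =====
-- A's while-loop, with reply[pos:] represented as the remaining suffix
-- (reply.find("letter:", pos) = pos + find of the suffix; slices are relative to pos).
def fixLoopA (s : List Char) : List (List Char) :=
  let pos1 := PySem.Chars.find s pvSep
  if h : pos1 = -1 then
    [PySem.Chars.stripChars s [' ']]
  else
    PySem.Chars.stripChars (s.take (pos1.toNat + 7)) [' '] ::
      fixLoopA (s.drop (pos1.toNat + 7))
termination_by s.length
decreasing_by
  have h0 : 0 ≤ PySem.Chars.find s pvSep := by
    have := PySem.Chars.neg_one_le_find s pvSep; omega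
  have hpre := (PySem.Chars.find_spec (s := s) (sub := pvSep) h0).1
  have hlen := hpre.length_le
  have h7 : pvSep.length = 7 := rfl
  simp only [List.length_drop] at *
  omega

def fix_reply_py (reply : String) : String :=
  String.ofList (PySem.Chars.join ['\n'] (fixLoopA reply.toList))

-- ===== PORT B =====
-- One step of Source B's for-loop: append ch to buf; if buf ends with "letter:"
-- (Python's buf[-7:] == list("letter:"), ported as drop (len-7) under the len ≥ 7
-- guard, which is exact there), flush the stripped buffer as a phrase.
def stepB (st : List (List Char) × List Char) (ch : Char) :
    List (List Char) × List Char :=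
  let buf := st.2 ++ [ch]
  if ch = ':' ∧ 7 ≤ buf.length ∧ buf.drop (buf.length - 7) = pvSep then
    (st.1 ++ [PySem.Chars.stripChars buf [' ']], [])
  else (st.1, buf)

def fix_reply_py_alt (reply : String) : String :=
  let st := reply.toList.foldl stepB ([], [])
  String.ofList
    (PySem.Chars.join ['\n'] (st.1 ++ [PySem.Chars.stripChars st.2 [' ']]))

-- ===== PRECONDITION & SPEC =====
def Spec_fix_reply_py (reply : String) (out : String) : Prop := out = fix_reply_py_alt reply
instance (reply : String) (out : String) : Decidable (Spec_fix_reply_py reply out) := by unfold Spec_fix_reply_py; infer_instance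

-- ===== CLAIM (what is proved, stated in full; the proofs are below) =====
def Claim_equal_fix_reply_py : Prop := ∀ (reply : String), Dom_fix_reply_py reply → Spec_fix_reply_py reply (fix_reply_py reply)

-- ===== LEMMAS AND PROOFS =====

-- Recursive description of B's fold: the phrases emitted and the final buffer.
def scanB (buf : List Char) : List Char → List (List Char) × List Char
  | [] => ([], buf)
  | ch :: rest =>
    let buf' := buf ++ [ch]
    if ch = ':' ∧ 7 ≤ buf'.length ∧ buf'.drop (buf'.length - 7) = pvSep then
      let p := scanB [] rest
      (PySem.Chars.stripChars buf' [' '] :: p.1, p.2)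
    else scanB buf' rest

lemma foldl_stepB_scanB (s : List Char) : ∀ (acc : List (List Char)) (buf : List Char),
    s.foldl stepB (acc, buf) = (acc ++ (scanB buf s).1, (scanB buf s).2) := by
  induction s with
  | nil => intro acc buf; simp [scanB]
  | cons ch rest ih =>
    intro acc buf
    simp only [List.foldl_cons, scanB, stepB]
    split
    · rw [ih]; simp
    · rw [ih]

lemma infix_of_occ (sub l : List Char) (i : Nat) (h : sub <+: l.drop i) : sub <:+: l :=
  h.isInfix.trans (List.drop_suffix i l).isInfix

lemma occ_exists_of_infix (sub l : List Char) (h : sub <:+: l) : ∃ j, sub <+: l.drop j := by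
  obtain ⟨p, s, hps⟩ := h
  exact ⟨p.length, by rw [← hps, List.append_assoc, List.drop_left]; exact List.prefix_append _ _⟩

-- An occurrence of pvSep that lies inside the prefix l of l ++ t is an occurrence in l.
lemma occ_in_prefix (l t : List Char) (i : Nat) (hle : i + 7 ≤ l.length)
    (h : pvSep <+: (l ++ t).drop i) : pvSep <+: l.drop i := by
  rw [List.drop_append_of_le_length (by omega)] at h
  exact (List.isPrefix_append_of_length (by simp [pvSep]; omega)).mp h

lemma find_eq_of (s sub : List Char) (k : Nat)
    (h1 : sub <+: s.drop k) (h2 : ∀ i < k, ¬ sub <+: s.drop i) :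
    PySem.Chars.find s sub = (k : Int) := by
  have hnn : 0 ≤ PySem.Chars.find s sub :=
    (PySem.Chars.find_nonneg_iff _ _).mpr (infix_of_occ sub s k h1)
  obtain ⟨hpre, hmin⟩ := PySem.Chars.find_spec (s := s) (sub := sub) hnn
  rcases lt_trichotomy (PySem.Chars.find s sub).toNat k with h | h | h
  · exact absurd hpre (h2 _ h)
  · omega
  · exact absurd h1 (hmin k h)

-- Main invariant: scanning s with a buffer containing no occurrence of the
-- separator yields exactly A's phrases for buf ++ s.
lemma fixLoopA_scanB (s : List Char) : ∀ (buf : List Char), ¬ pvSep <:+: buf →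
    fixLoopA (buf ++ s) =
      (scanB buf s).1 ++ [PySem.Chars.stripChars (scanB buf s).2 [' ']] := by
  induction s with
  | nil =>
    intro buf hbuf
    have hf : PySem.Chars.find buf pvSep = -1 :=
      (PySem.Chars.find_eq_neg_one_iff _ _).mpr hbuf
    rw [fixLoopA]
    simp [hf, scanB]
  | cons ch rest ih =>
    intro buf hbuf
    have hsplit : buf ++ ch :: rest = (buf ++ [ch]) ++ rest := by simp
    simp only [scanB]
    by_cases hc : ch = ':' ∧ 7 ≤ (buf ++ [ch]).length ∧
        (buf ++ [ch]).drop ((buf ++ [ch]).length - 7) = pvSep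
    · rw [if_pos hc]
      obtain ⟨-, hlen, hdrop⟩ := hc
      have h1 : pvSep <+: ((buf ++ [ch]) ++ rest).drop ((buf ++ [ch]).length - 7) := by
        rw [List.drop_append_of_le_length (by omega), hdrop]
        exact List.prefix_append _ _
      have h2 : ∀ i < (buf ++ [ch]).length - 7,
          ¬ pvSep <+: ((buf ++ [ch]) ++ rest).drop i := by
        intro i hi hp
        have h3 : pvSep <+: (buf ++ [ch]).drop i :=
          occ_in_prefix (buf ++ [ch]) rest i (by omega) hp
        have h4 : pvSep <+: buf.drop i :=
          occ_in_prefix buf [ch] i (by simp at hi ⊢; omega) h3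
        exact hbuf (infix_of_occ pvSep buf i h4)
      have hfind : PySem.Chars.find ((buf ++ [ch]) ++ rest) pvSep
          = (((buf ++ [ch]).length - 7 : Nat) : Int) := find_eq_of _ _ _ h1 h2
      rw [hsplit, fixLoopA]
      simp only [hfind]
      rw [dif_neg (by omega)]
      have htoNat : (((buf ++ [ch]).length - 7 : Nat) : Int).toNat + 7
          = (buf ++ [ch]).length := by
        simp only [Int.toNat_natCast]; omega
      rw [htoNat, List.take_left, List.drop_left]
      have hnil := ih [] (by intro h; have := h.length_le; simp [pvSep] at this)
      rw [List.nil_append] at hnil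
      rw [hnil]
      simp
    · rw [if_neg hc]
      have hbuf' : ¬ pvSep <:+: (buf ++ [ch]) := by
        intro hinf
        obtain ⟨j, hj⟩ := occ_exists_of_infix _ _ hinf
        have hjlen : j + 7 ≤ (buf ++ [ch]).length := by
          have := hj.length_le
          simp only [List.length_drop] at this
          have h7 : pvSep.length = 7 := rfl
          omega
        by_cases hjb : j + 7 ≤ buf.length
        · exact hbuf (infix_of_occ pvSep buf j (occ_in_prefix buf [ch] j hjb hj))
        · -- the occurrence ends at the last character: the step condition holds, contradiction
          have hlen : 7 ≤ (buf ++ [ch]).length := by omega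
          have hjeq : j = (buf ++ [ch]).length - 7 := by
            simp only [List.length_append, List.length_cons, List.length_nil] at *
            omega
          have hdrop : (buf ++ [ch]).drop ((buf ++ [ch]).length - 7) = pvSep := by
            rw [← hjeq]
            refine (hj.eq_of_length ?_).symm
            simp only [List.length_drop]
            have h7 : pvSep.length = 7 := rfl
            omega
          have hch : ch = ':' := by
            have hgl : ((buf ++ [ch]).drop ((buf ++ [ch]).length - 7)).getLast? = some ':' := by
              rw [hdrop]; rfl
            rw [List.getLast?_drop] at hgl
            · simp at hgl
              exact hgl
          exact hc ⟨hch, hlen, hdrop⟩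
      rw [hsplit, ih (buf ++ [ch]) hbuf']

-- ===== VERDICT (by name: the statement is the Claim_ definition above) =====
theorem fix_reply_py_spec : Claim_equal_fix_reply_py := by
  intro reply _
  unfold Spec_fix_reply_py fix_reply_py fix_reply_py_alt
  have h := fixLoopA_scanB reply.toList [] (by
    intro h; have := h.length_le; simp [pvSep] at this)
  rw [List.nil_append] at h
  rw [h, foldl_stepB_scanB]
  simp
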